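-- pv_equiv track=rewrite | github.com/FraunhoferFITBusinessInformationSystems/inter-technology-relationship-networks | algorithms/node_algorithms.py | cumulate_count
-- ===== SOURCE A (Python) =====
-- def cumulate_count(counts, years):
--     """ Build aggregated results: the value of an year includes all prior years
--
--     Parameters
--     ----------
--     counts : dict((year, node))
--     years : list(int)
--
--     Returns
--     -------
--     count_cumulated : dict((year, node1, node2))
--     """
--     count_cumulated = {}
--     for idx in counts:
--         for year in years:
--             if idx[0] <= year:
--                 if (year, idx[1]) in count_cumulated:
--                     count_cumulated[(year, idx[1])] = count_cumulated[(year, idx[1])] + counts[idx]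
--                 else:
--                     count_cumulated[(year, idx[1])] = counts[idx]
--     return count_cumulated
-- ===== SOURCE B (Python) =====
-- def cumulate_count(counts, years):
--     """Group the counts by node, then emit one cumulative sum per reachable
--     (year, node) key, keys in order of first reachability."""
--     keys = dict.fromkeys(
--         (year, node) for (entry_year, node) in counts for year in years
--         if entry_year <= year)
--     by_node = {}
--     for (entry_year, node), c in counts.items():
--         by_node.setdefault(node, []).append((entry_year, c))
--     return {(year, node): sum(c for ey, c in by_node[node] if ey <= year)
--             for (year, node) in keys}
-- ===== Notes on version B (the rewrite author's own statement) =====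
-- stated objective: alternative
-- what changed: A accumulates into the result dict with a membership test and in-place update per (entry, year) pair; B never accumulates: it collects the reachable (year, node) keys once with dict.fromkeys, groups the entries by node in one pass, and emits each output value as a single sum over that node's group. Pre_ excludes counts lists with duplicate (year, node) keys (they represent no Python dict) and years lists containing a repeated year, a corner no caller specifies, on which A adds a count once per occurrence of the repeated year while B counts each entry once per distinct year.
-- outside the precondition, e.g. on cumulate_count({(1, 1): 3}, [1, 1]): A returns {(1, 1): 6}, B returns {(1, 1): 3}
import Mathlib
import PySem

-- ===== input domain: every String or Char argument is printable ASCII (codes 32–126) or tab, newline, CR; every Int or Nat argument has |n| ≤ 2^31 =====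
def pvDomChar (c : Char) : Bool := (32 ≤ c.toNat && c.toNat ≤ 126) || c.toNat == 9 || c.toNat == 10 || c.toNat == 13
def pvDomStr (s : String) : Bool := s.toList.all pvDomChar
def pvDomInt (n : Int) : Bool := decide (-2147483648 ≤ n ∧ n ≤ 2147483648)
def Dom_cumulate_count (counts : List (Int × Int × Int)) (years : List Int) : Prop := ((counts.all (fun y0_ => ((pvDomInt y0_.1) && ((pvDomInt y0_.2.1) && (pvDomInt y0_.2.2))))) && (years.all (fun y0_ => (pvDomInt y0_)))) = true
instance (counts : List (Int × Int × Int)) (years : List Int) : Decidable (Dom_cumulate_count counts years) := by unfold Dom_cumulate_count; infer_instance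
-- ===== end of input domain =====

-- B replaces A's per-(entry,year) dict-membership accumulation by collecting the reachable
-- keys once and emitting one grouped sum per key (objective: alternative).

-- ===== PORT A =====
-- `counts[idx]` is the value of the entry itself (`e.2.2`): exact under Pre_ (unique keys).
def cumulate_count (counts : List (Int × Int × Int)) (years : List Int) : List (Int × Int × Int) :=
  ((counts.foldl (fun d e =>
      years.foldl (fun (d : PySem.Dict (Int × Int) Int) y =>
        if e.1 ≤ y then
          if d.contains (y, e.2.1) then d.insert (y, e.2.1) (d.getD (y, e.2.1) 0 + e.2.2)
          else d.insert (y, e.2.1) e.2.2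
        else d) d)
    PySem.Dict.empty).items).map (fun p => (p.1.1, p.1.2, p.2))

-- ===== PORT B =====
def cumulate_count_alt (counts : List (Int × Int × Int)) (years : List Int) : List (Int × Int × Int) :=
  -- keys = dict.fromkeys(generator): first occurrences, in order
  let keys := PySem.Set.ofList (counts.flatMap (fun e =>
      (years.filter (fun y => decide (e.1 ≤ y))).map (fun y => (y, e.2.1))))
  -- by_node.setdefault(node, []).append((entry_year, c))
  let byNode := counts.foldl (fun (d : PySem.Dict Int (List (Int × Int))) e =>
      d.modify e.2.1 [] (· ++ [(e.1, e.2.2)])) PySem.Dict.empty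
  ((keys.foldl (fun (d : PySem.Dict (Int × Int) Int) k =>
      d.insert k ((byNode.getD k.2 []).foldl (fun s p => if p.1 ≤ k.1 then s + p.2 else s) 0))
    PySem.Dict.empty).items).map (fun p => (p.1.1, p.1.2, p.2))

-- ===== PRECONDITION & SPEC =====
-- Pre_ excludes (i) counts with duplicate (year, node) keys, which represent no Python dict,
-- and (ii) years lists containing a repeated year — a corner no caller specifies, on which
-- A accumulates a count once per occurrence of the repeated year while B counts each entry
-- once per distinct year.
def Pre_cumulate_count (counts : List (Int × Int × Int)) (years : List Int) : Prop :=
  (counts.map (fun e => (e.1, e.2.1))).Nodup ∧ years.Nodup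

instance (counts : List (Int × Int × Int)) (years : List Int) : Decidable (Pre_cumulate_count counts years) := by
  unfold Pre_cumulate_count; infer_instance

def pvWitness_cumulate_count : (List (Int × Int × Int)) × List Int := ([(1, 1, 2), (0, 2, 3)], [0, 1])

def Spec_cumulate_count (counts : List (Int × Int × Int)) (years : List Int) (out : List (Int × Int × Int)) : Prop :=
  out = cumulate_count_alt counts years

instance (counts : List (Int × Int × Int)) (years : List Int) (out : List (Int × Int × Int)) : Decidable (Spec_cumulate_count counts years out) := by
  unfold Spec_cumulate_count; infer_instance

-- ===== CLAIM (what is proved, stated in full; the proofs are below) =====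
def Claim_equal_cumulate_count : Prop := ∀ (counts : List (Int × Int × Int)) (years : List Int), Dom_cumulate_count counts years → Pre_cumulate_count counts years → Spec_cumulate_count counts years (cumulate_count counts years)

-- ===== LEMMAS AND PROOFS =====

theorem pv_shift {α : Type} (C : α → Prop) [DecidablePred C] (g : α → Int) :
    ∀ (l : List α) (s : Int),
      l.foldl (fun s x => if C x then s + g x else s) s
        = s + l.foldl (fun s x => if C x then s + g x else s) 0 := by
  intro l
  induction l with
  | nil => intro s; simp
  | cons x xs ih =>
    intro s
    simp only [List.foldl_cons]
    by_cases h : C x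
    · simp only [if_pos h]
      rw [ih (s + g x), ih (0 + g x)]
      ring
    · simp only [if_neg h]
      exact ih s

theorem pvOfListFilter {α : Type} [BEq α] [LawfulBEq α] (p : α → Bool) :
    ∀ l : List α, PySem.Set.ofList (l.filter p) = (PySem.Set.ofList l).filter p := by
  intro l
  induction l using List.reverseRecOn with
  | nil => rfl
  | append_singleton l x ih =>
    rw [List.filter_append, PySem.Set.ofList_append_singleton]
    by_cases hp : p x = true
    · simp only [List.filter_cons, hp, if_true, List.filter_nil]
      rw [PySem.Set.ofList_append_singleton, ih]
      by_cases hx : x ∈ PySem.Set.ofList l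
      · rw [PySem.Set.add_of_mem hx, PySem.Set.add_of_mem (by
          rw [List.mem_filter]; exact ⟨hx, hp⟩)]
      · rw [PySem.Set.add_of_not_mem hx, PySem.Set.add_of_not_mem (by
          rw [List.mem_filter]; exact fun h => hx h.1), List.filter_append]
        simp [hp]
    · simp only [List.filter_cons, hp, if_false, List.filter_nil, List.append_nil,
        Bool.false_eq_true]
      rw [ih]
      by_cases hx : x ∈ PySem.Set.ofList l
      · rw [PySem.Set.add_of_mem hx]
      · rw [PySem.Set.add_of_not_mem hx, List.filter_append]
        simp [hp]

theorem pvOfListMap {α β : Type} [BEq α] [LawfulBEq α] [BEq β] [LawfulBEq β]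
    (f : α → β) (hf : Function.Injective f) :
    ∀ l : List α, PySem.Set.ofList (l.map f) = (PySem.Set.ofList l).map f := by
  intro l
  induction l using List.reverseRecOn with
  | nil => rfl
  | append_singleton l x ih =>
    rw [List.map_append, List.map_cons, List.map_nil,
        PySem.Set.ofList_append_singleton, PySem.Set.ofList_append_singleton, ih]
    by_cases hx : x ∈ PySem.Set.ofList l
    · rw [PySem.Set.add_of_mem (List.mem_map_of_mem hx), PySem.Set.add_of_mem hx]
    · rw [PySem.Set.add_of_not_mem (show f x ∉ (PySem.Set.ofList l).map f by
          intro hmem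
          obtain ⟨y, hy, hyx⟩ := List.mem_map.mp hmem
          exact hx (hf hyx ▸ hy)),
        PySem.Set.add_of_not_mem hx, List.map_append]
      rfl

theorem pvGetDFoldlInsert {κ ν : Type} [BEq κ] [LawfulBEq κ] [DecidableEq κ] (v : κ → ν) (d0 : ν) :
    ∀ (l : List κ) (d : PySem.Dict κ ν) (k : κ),
      (l.foldl (fun d k => d.insert k (v k)) d).getD k d0
        = if k ∈ l then v k else d.getD k d0 := by
  intro l
  induction l using List.reverseRecOn with
  | nil => intro d k; simp
  | append_singleton l x ih =>
    intro d k
    rw [List.foldl_append, List.foldl_cons, List.foldl_nil, PySem.Dict.getD_insert, ih]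
    by_cases hk : k = x
    · simp [hk]
    · simp only [hk, if_false, List.mem_append, List.mem_singleton]
      by_cases hm : k ∈ l <;> simp [hm, hk]

theorem innerA (ey n c : Int) :
    ∀ (ys : List Int) (L : List ((Int × Int) × Int)) (d : PySem.Dict (Int × Int) Int),
      d.items = L → (L.map Prod.fst).Nodup →
      (∀ y ∈ ys, ey ≤ y → ys.count y ≤ 1 ∨ c = 0) →
      (ys.foldl (fun d y =>
          if ey ≤ y then
            if d.contains (y, n) then d.insert (y, n) (d.getD (y, n) 0 + c)
            else d.insert (y, n) c
          else d) d).items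
        = L.map (fun q => if q.1.2 = n ∧ ey ≤ q.1.1 ∧ q.1.1 ∈ ys then (q.1, q.2 + c) else q)
          ++ (PySem.Set.ofList (ys.filter
                (fun y => decide (ey ≤ y) && !decide ((y, n) ∈ L.map Prod.fst)))).map
               (fun y => ((y, n), c)) := by
  intro ys
  induction ys with
  | nil =>
    intro L d hL _ _
    simp [hL, PySem.Set.ofList]
  | cons y0 ys ih =>
    intro L d hL hnd hcnt
    have hcnt' : ∀ y ∈ ys, ey ≤ y → ys.count y ≤ 1 ∨ c = 0 := by
      intro y hy hle
      rcases hcnt y (by simp [hy]) hle with h1 | h1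
      · left
        have h2 : ys.count y ≤ (y0 :: ys).count y := List.count_le_count_cons ..
        omega
      · right; exact h1
    simp only [List.foldl_cons]
    by_cases h0 : ey ≤ y0
    · have hy0 : y0 ∈ ys → c = 0 := by
        intro hmem
        rcases hcnt y0 (by simp) h0 with h1 | h1
        · exfalso
          have : 1 ≤ ys.count y0 := List.one_le_count_iff.mpr hmem
          simp [List.count_cons_self] at h1
          omega
        · exact h1
      have hkeys : d.keys = L.map Prod.fst := by
        simp [PySem.Dict.keys, hL]
      by_cases hc : (y0, n) ∈ L.map Prod.fst
      · -- key already present: overwrite with accumulated value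
        have hcont : d.contains (y0, n) = true := by
          rw [PySem.Dict.contains_eq_decide_mem_keys, hkeys]; simp [hc]
        rw [if_pos h0, if_pos hcont]
        have hitems' : (d.insert (y0, n) (d.getD (y0, n) 0 + c)).items
            = L.map (fun q => if q.1 == (y0, n) then ((y0, n), d.getD (y0, n) 0 + c) else q) := by
          rw [PySem.Dict.items_insert_of_contains d _ hcont, hL]
        set L' := L.map (fun q => if q.1 == (y0, n) then ((y0, n), d.getD (y0, n) 0 + c) else q) with hL'
        have hfst' : L'.map Prod.fst = L.map Prod.fst := by
          rw [hL', List.map_map]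
          apply List.map_congr_left
          intro q hq
          by_cases hq1 : q.1 = (y0, n) <;> simp [hq1]
        have hrec := ih L' (d.insert (y0, n) (d.getD (y0, n) 0 + c)) hitems'
          (by rw [hfst']; exact hnd) hcnt'
        rw [hrec]
        congr 1
        · rw [hL', List.map_map]
          apply List.map_congr_left
          intro q hq
          by_cases hq1 : q.1 = (y0, n)
          · rcases q with ⟨qk, qv⟩
            simp only at hq1
            subst hq1
            have hgq : d.getD (y0, n) 0 = qv := by
              apply PySem.Dict.getD_of_mem_items (v := qv)
              · rw [hL]; exact hq
              · rw [hkeys]; exact hnd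
            simp only [Function.comp_apply, beq_self_eq_true, if_true]
            rw [if_pos (show True ∧ ey ≤ y0 ∧ y0 ∈ y0 :: ys from ⟨trivial, h0, by simp⟩)]
            by_cases hy0m : y0 ∈ ys
            · rw [if_pos (show True ∧ ey ≤ y0 ∧ y0 ∈ ys from ⟨trivial, h0, hy0m⟩), hgq, hy0 hy0m]
              simp
            · rw [if_neg (by rintro ⟨-, -, hmem⟩; exact hy0m hmem), hgq]
          · simp only [Function.comp_apply, beq_iff_eq, hq1, ite_false]
            by_cases hcond : q.1.2 = n ∧ ey ≤ q.1.1 ∧ q.1.1 ∈ ys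
            · rw [if_pos hcond, if_pos ⟨hcond.1, hcond.2.1, by simp [hcond.2.2]⟩]
            · rw [if_neg hcond, if_neg (by
                rintro ⟨ha, hb, hmemc⟩
                rcases List.mem_cons.mp hmemc with hh | hmem
                · exact hq1 (Prod.ext hh ha)
                · exact hcond ⟨ha, hb, hmem⟩)]
        · rw [hfst']
          simp only [List.filter_cons]
          rw [if_neg (by simp [hc])]
      · -- new key: appended with value c
        have hcont : d.contains (y0, n) = false := by
          rw [PySem.Dict.contains_eq_decide_mem_keys, hkeys]; simp [hc]
        rw [if_pos h0, hcont]
        simp only [Bool.false_eq_true, if_false]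
        have hitems' : (d.insert (y0, n) c).items = L ++ [((y0, n), c)] := by
          rw [PySem.Dict.items_insert_of_not_contains d _ hcont, hL]
        have hfst' : (L ++ [((y0, n), c)]).map Prod.fst = L.map Prod.fst ++ [(y0, n)] := by simp
        have hrec := ih (L ++ [((y0, n), c)]) (d.insert (y0, n) c) hitems'
          (by
            rw [hfst']
            exact List.Nodup.append hnd (List.nodup_singleton _)
              (by simpa [List.disjoint_singleton] using hc)) hcnt'
        rw [hrec]
        rw [List.map_append]
        have hone : ([((y0, n), c)].map
            (fun q => if q.1.2 = n ∧ ey ≤ q.1.1 ∧ q.1.1 ∈ ys then (q.1, q.2 + c) else q))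
            = [((y0, n), c)] := by
          simp only [List.map_cons, List.map_nil]
          by_cases hy0m : y0 ∈ ys
          · rw [if_pos (show True ∧ ey ≤ y0 ∧ y0 ∈ ys from ⟨trivial, h0, hy0m⟩), hy0 hy0m]
            simp
          · rw [if_neg (by rintro ⟨-, -, hmem⟩; exact hy0m hmem)]
        rw [hone]
        have hmapeq : L.map (fun q => if q.1.2 = n ∧ ey ≤ q.1.1 ∧ q.1.1 ∈ ys then (q.1, q.2 + c) else q)
            = L.map (fun q => if q.1.2 = n ∧ ey ≤ q.1.1 ∧ q.1.1 ∈ y0 :: ys then (q.1, q.2 + c) else q) := by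
          apply List.map_congr_left
          intro q hq
          by_cases hcond : q.1.2 = n ∧ ey ≤ q.1.1 ∧ q.1.1 ∈ ys
          · rw [if_pos hcond, if_pos ⟨hcond.1, hcond.2.1, by simp [hcond.2.2]⟩]
          · rw [if_neg hcond, if_neg (by
              rintro ⟨ha, hb, hmemc⟩
              rcases List.mem_cons.mp hmemc with hh | hmem
              · exact hc (by rw [← ha, ← hh]; exact List.mem_map_of_mem hq)
              · exact hcond ⟨ha, hb, hmem⟩)]
        have hfilt : ys.filter (fun y => decide (ey ≤ y) && !decide ((y, n) ∈ (L ++ [((y0, n), c)]).map Prod.fst))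
            = (ys.filter (fun y => decide (ey ≤ y) && !decide ((y, n) ∈ L.map Prod.fst))).filter
                (fun y => !(y == y0)) := by
          rw [List.filter_filter]
          apply List.filter_congr
          intro y hy
          by_cases hle : ey ≤ y
          · by_cases hyy : y = y0
            · subst hyy
              simp [hle]
            · simp only [hfst', List.mem_append, List.mem_singleton]
              simp [hle, hyy]
          · simp [hle]
        rw [hfilt, hmapeq]
        have hhead : (y0 :: ys).filter (fun y => decide (ey ≤ y) && !decide ((y, n) ∈ L.map Prod.fst))
            = y0 :: ys.filter (fun y => decide (ey ≤ y) && !decide ((y, n) ∈ L.map Prod.fst)) := by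
          simp only [List.filter_cons]
          rw [if_pos (by simp [h0, hc])]
        rw [hhead, PySem.Set.ofList_cons,
            pvOfListFilter (fun y => !(y == y0))
              (ys.filter (fun y => decide (ey ≤ y) && !decide ((y, n) ∈ L.map Prod.fst)))]
        show _ ++ (PySem.Set.discard _ y0).map _ = _ ++ (y0 :: PySem.Set.discard _ y0).map _
        simp [List.append_assoc]
    · -- year below the entry year: no update
      rw [if_neg h0]
      rw [ih L d hL hnd hcnt']
      congr 1
      · apply List.map_congr_left
        intro q hq
        by_cases hcond : q.1.2 = n ∧ ey ≤ q.1.1 ∧ q.1.1 ∈ ys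
        · rw [if_pos hcond, if_pos ⟨hcond.1, hcond.2.1, by simp [hcond.2.2]⟩]
        · rw [if_neg hcond, if_neg ?_]
          rintro ⟨ha, hb, hmemc⟩
          rcases List.mem_cons.mp hmemc with rfl | hmem
          · exact h0 hb
          · exact hcond ⟨ha, hb, hmem⟩
      · simp only [List.filter_cons]
        rw [if_neg (by simp [h0])]

def pvSum (p : List (Int × Int × Int)) (k : Int × Int) : Int :=
  p.foldl (fun s e => if e.2.1 = k.2 ∧ e.1 ≤ k.1 then s + e.2.2 else s) 0

-- the reachable-key list B deduplicates
def pvFlat (years : List Int) (p : List (Int × Int × Int)) : List (Int × Int) :=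
  p.flatMap (fun e => (years.filter (fun y => decide (e.1 ≤ y))).map (fun y => (y, e.2.1)))

theorem pvSum_append (p : List (Int × Int × Int)) (e : Int × Int × Int) (k : Int × Int) :
    pvSum (p ++ [e]) k = pvSum p k + (if e.2.1 = k.2 ∧ e.1 ≤ k.1 then e.2.2 else 0) := by
  simp only [pvSum, List.foldl_append, List.foldl_cons, List.foldl_nil]
  split <;> simp

theorem pvSum_eq_zero (p : List (Int × Int × Int)) (k : Int × Int)
    (h : ∀ e ∈ p, e.2.1 = k.2 → ¬ e.1 ≤ k.1) : pvSum p k = 0 := by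
  induction p using List.reverseRecOn with
  | nil => simp [pvSum]
  | append_singleton p e ih =>
    rw [pvSum_append]
    have h1 := h e (by simp)
    have h2 : ∀ e' ∈ p, e'.2.1 = k.2 → ¬ e'.1 ≤ k.1 := fun e' he' => h e' (by simp [he'])
    rw [ih h2]
    split
    · next hc => exact absurd hc.2 (h1 hc.1)
    · simp

theorem pvMemFlat (years : List Int) (p : List (Int × Int × Int)) (y n : Int) :
    (y, n) ∈ pvFlat years p ↔ y ∈ years ∧ ∃ e ∈ p, e.2.1 = n ∧ e.1 ≤ y := by
  simp only [pvFlat, List.mem_flatMap, List.mem_map, List.mem_filter, decide_eq_true_eq]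
  constructor
  · rintro ⟨e, he, y', ⟨hy', hle⟩, heq⟩
    obtain ⟨h1, h2⟩ := Prod.mk.injEq .. ▸ heq
    exact ⟨h1 ▸ hy', e, he, h2, h1 ▸ hle⟩
  · rintro ⟨hy, e, he, hn, hle⟩
    exact ⟨e, he, y, ⟨hy, hle⟩, by rw [hn]⟩

theorem pvFstFlat (years : List Int) (p : List (Int × Int × Int)) (k : Int × Int)
    (hk : k ∈ pvFlat years p) : k.1 ∈ years := by
  rcases k with ⟨y, n⟩
  exact ((pvMemFlat years p y n).mp hk).1

theorem mainInv (years : List Int) (counts : List (Int × Int × Int))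
    (HY : ∀ y ∈ years, 2 ≤ years.count y → ∀ e ∈ counts, e.1 ≤ y → e.2.2 = 0) :
    ∀ p, p <+: counts →
      (p.foldl (fun d e =>
          years.foldl (fun (d : PySem.Dict (Int × Int) Int) y =>
            if e.1 ≤ y then
              if d.contains (y, e.2.1) then d.insert (y, e.2.1) (d.getD (y, e.2.1) 0 + e.2.2)
              else d.insert (y, e.2.1) e.2.2
            else d) d) PySem.Dict.empty).items
        = (PySem.Set.ofList (pvFlat years p)).map (fun k => (k, pvSum p k)) := by
  intro p
  induction p using List.reverseRecOn with
  | nil =>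
    intro _
    simp [show (PySem.Dict.empty : PySem.Dict (Int × Int) Int).items = [] from rfl,
      pvFlat, show PySem.Set.ofList ([] : List (Int × Int)) = [] from rfl]
  | append_singleton p e ih =>
    intro hpre
    have hpre' : p <+: counts := ((List.prefix_append p [e]).trans hpre)
    have hemem : e ∈ counts := hpre.subset (by simp)
    have inv4 := ih hpre'
    set n := e.2.1 with hn
    set c := e.2.2 with hc
    set S := PySem.Set.ofList (pvFlat years p) with hS
    have hcnt : ∀ y ∈ years, e.1 ≤ y → years.count y ≤ 1 ∨ e.2.2 = 0 := by
      intro y hy hle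
      by_cases h2 : 2 ≤ years.count y
      · exact Or.inr (HY y hy h2 e hemem hle)
      · exact Or.inl (by omega)
    rw [List.foldl_append, List.foldl_cons, List.foldl_nil]
    have hfst : ((S.map (fun k => (k, pvSum p k))).map Prod.fst) = S := by
      rw [List.map_map]
      exact List.map_id _ ▸ rfl
    rw [innerA e.1 n c years (S.map (fun k => (k, pvSum p k))) _ inv4
        (by rw [hfst]; exact hS ▸ PySem.Set.nodup_ofList (pvFlat years p)) hcnt]
    rw [hfst]
    -- the new reachable-key list splits into the old keys and this entry's fresh keys
    have hflat : pvFlat years (p ++ [e])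
        = pvFlat years p ++ (years.filter (fun y => decide (e.1 ≤ y))).map (fun y => (y, n)) := by
      simp only [pvFlat, List.flatMap_append, List.flatMap_cons, List.flatMap_nil,
        List.append_nil, hn]
    rw [hflat, PySem.Set.ofList_append, PySem.Set.update_eq_append_filter, ← hS]
    have hfresh : ((PySem.Set.ofList ((years.filter (fun y => decide (e.1 ≤ y))).map
            (fun y => (y, n)))).filter (fun k => !(PySem.Set.contains S k)))
        = (PySem.Set.ofList (years.filter
            (fun y => decide (e.1 ≤ y) && !decide ((y, n) ∈ S)))).map (fun y => (y, n)) := by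
      rw [pvOfListMap (fun y => (y, n)) (fun a b hab => by injection hab), List.filter_map,
          ← pvOfListFilter, List.filter_filter]
      congr 2
      apply List.filter_congr
      intro y _
      by_cases hmem : (y, n) ∈ S
      · simp [Function.comp, (PySem.Set.contains_iff S (y, n)).mpr hmem, hmem]
      · have hcf : PySem.Set.contains S (y, n) = false := by
          rw [← Bool.not_eq_true]
          exact fun h => hmem ((PySem.Set.contains_iff S (y, n)).mp h)
        simp [Function.comp, hcf, hmem, Bool.and_comm]
    rw [hfresh, List.map_append]
    congr 1
    · -- old keys: the update adds this entry's contribution to the cumulative sum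
      rw [List.map_map]
      apply List.map_congr_left
      intro k hk
      have hky : k.1 ∈ years := pvFstFlat years p k ((PySem.Set.mem_ofList _ _).mp (hS ▸ hk))
      simp only [Function.comp_apply]
      rw [pvSum_append]
      by_cases hcond : k.2 = n ∧ e.1 ≤ k.1
      · rw [if_pos (show k.2 = n ∧ e.1 ≤ k.1 ∧ k.1 ∈ years from ⟨hcond.1, hcond.2, hky⟩),
            if_pos (show e.2.1 = k.2 ∧ e.1 ≤ k.1 from ⟨(hcond.1.trans hn).symm, hcond.2⟩)]
      · rw [if_neg (fun hh => hcond ⟨hh.1, hh.2.1⟩),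
            if_neg (fun hh => hcond ⟨hh.1.symm.trans hn.symm, hh.2⟩), add_zero]
    · -- fresh keys: no earlier entry reaches them, so the sum is this entry's count alone
      rw [List.map_map]
      apply List.map_congr_left
      intro y hyF
      have hyF' := (PySem.Set.mem_ofList _ _).mp hyF
      simp only [List.mem_filter, Bool.and_eq_true, Bool.not_eq_true',
        decide_eq_false_iff_not, decide_eq_true_eq] at hyF'
      obtain ⟨hy, hle, hnotin⟩ := hyF'
      simp only [Function.comp_apply]
      have h0 : pvSum p (y, n) = 0 := by
        apply pvSum_eq_zero
        intro e' he' hn' hle'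
        exact hnotin (hS ▸ (PySem.Set.mem_ofList _ _).mpr
          ((pvMemFlat years p y n).mpr ⟨hy, e', he', hn', hle'⟩))
      rw [pvSum_append, h0, if_pos (show e.2.1 = (y, n).2 ∧ e.1 ≤ (y, n).1 from ⟨hn.symm, hle⟩),
          zero_add]

theorem pvSumGroup (p : List (Int × Int × Int)) (y n : Int) :
    ((((p.map (fun e => (e.2.1, (e.1, e.2.2)))).filter (fun q => q.1 == n)).map Prod.snd).foldl
        (fun s q => if q.1 ≤ y then s + q.2 else s) 0) = pvSum p (y, n) := by
  induction p with
  | nil => rfl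
  | cons e p ih =>
    simp only [pvSum, List.map_cons, List.filter_cons, List.foldl_cons]
    by_cases h : e.2.1 = n
    · simp only [h, beq_self_eq_true, if_pos]
      simp only [List.map_cons, List.foldl_cons]
      by_cases h2 : e.1 ≤ y
      · rw [pv_shift (fun q => q.1 ≤ y) Prod.snd _ _]
        rw [ih]
        rw [pv_shift (fun e => e.2.1 = (y, n).2 ∧ e.1 ≤ (y, n).1) (fun e => e.2.2) p _]
        simp [pvSum, h2]
      · simp [h2, ih, pvSum, h]
    · simp only [beq_iff_eq, h, if_neg, ite_false]
      rw [ih]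
      simp [pvSum, h]

-- ===== VERDICT (by name: the statement is the Claim_ definition above) =====
theorem cumulate_count_spec : Claim_equal_cumulate_count := by
  unfold Claim_equal_cumulate_count
  intro counts years _ hpre
  have HY : ∀ y ∈ years, 2 ≤ years.count y → ∀ e ∈ counts, e.1 ≤ y → e.2.2 = 0 := by
    intro y hy h2 e he hle
    have h1 := List.nodup_iff_count_le_one.mp hpre.2 y
    omega
  have inv4 := mainInv years counts HY counts (List.prefix_refl _)
  show cumulate_count counts years = cumulate_count_alt counts years
  unfold cumulate_count cumulate_count_alt
  set keys := PySem.Set.ofList (counts.flatMap (fun e =>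
      (years.filter (fun y => decide (e.1 ≤ y))).map (fun y => (y, e.2.1)))) with hkeysdef
  set byNode := counts.foldl (fun (d : PySem.Dict Int (List (Int × Int))) e =>
      d.modify e.2.1 [] (· ++ [(e.1, e.2.2)])) PySem.Dict.empty with hbn
  have hkeysflat : keys = PySem.Set.ofList (pvFlat years counts) := by rw [hkeysdef]; rfl
  have hV : ∀ k : Int × Int,
      ((byNode.getD k.2 []).foldl (fun s p => if p.1 ≤ k.1 then s + p.2 else s) 0)
        = pvSum counts k := by
    intro k
    have hmapform : byNode
        = (counts.map (fun e => (e.2.1, (e.1, e.2.2)))).foldl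
            (fun (d : PySem.Dict Int (List (Int × Int))) q => d.modify q.1 [] (· ++ [q.2]))
            PySem.Dict.empty := by
      rw [hbn, List.foldl_map]
    rw [hmapform, PySem.Dict.getD_foldl_modify_append]
    rw [show (PySem.Dict.empty : PySem.Dict Int (List (Int × Int))).getD k.2 [] = [] from rfl,
        List.nil_append]
    have := pvSumGroup counts k.1 k.2
    simpa using this
  have hnodupkeys : ((keys.foldl (fun (d : PySem.Dict (Int × Int) Int) k =>
        d.insert k ((byNode.getD k.2 []).foldl (fun s p => if p.1 ≤ k.1 then s + p.2 else s) 0))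
        PySem.Dict.empty)).keys.Nodup :=
    PySem.Dict.nodup_keys_foldl_insert keys
      (fun _ k => ((byNode.getD k.2 []).foldl (fun s p => if p.1 ≤ k.1 then s + p.2 else s) 0))
      PySem.Dict.empty PySem.Dict.nodup_keys_empty
  have hkeyseq : ((keys.foldl (fun (d : PySem.Dict (Int × Int) Int) k =>
        d.insert k ((byNode.getD k.2 []).foldl (fun s p => if p.1 ≤ k.1 then s + p.2 else s) 0))
        PySem.Dict.empty)).keys = keys := by
    have h1 := PySem.Dict.keys_foldl_insert keys
      (fun _ k => ((byNode.getD k.2 []).foldl (fun s p => if p.1 ≤ k.1 then s + p.2 else s) 0))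
      (PySem.Dict.empty : PySem.Dict (Int × Int) Int)
    rw [show (PySem.Dict.empty : PySem.Dict (Int × Int) Int).keys = [] from rfl,
        PySem.Set.update_nil_left] at h1
    have hknd : keys.Nodup := by rw [hkeysdef]; exact PySem.Set.nodup_ofList _
    rw [h1]
    exact PySem.Set.ofList_eq_self_of_nodup keys hknd
  have hBitems : ((keys.foldl (fun (d : PySem.Dict (Int × Int) Int) k =>
        d.insert k ((byNode.getD k.2 []).foldl (fun s p => if p.1 ≤ k.1 then s + p.2 else s) 0))
        PySem.Dict.empty)).items
      = keys.map (fun k =>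
          (k, (byNode.getD k.2 []).foldl (fun s p => if p.1 ≤ k.1 then s + p.2 else s) 0)) := by
    rw [PySem.Dict.items_eq_map_keys _ hnodupkeys 0, hkeyseq]
    apply List.map_congr_left
    intro k hk
    rw [pvGetDFoldlInsert
        (fun k => ((byNode.getD k.2 []).foldl (fun s p => if p.1 ≤ k.1 then s + p.2 else s) 0))
        0 keys PySem.Dict.empty k, if_pos hk]
  rw [inv4]
  show List.map (fun p => (p.1.1, p.1.2, p.2))
        (List.map (fun k => (k, pvSum counts k)) (PySem.Set.ofList (pvFlat years counts)))
      = List.map (fun p => (p.1.1, p.1.2, p.2))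
        ((keys.foldl (fun (d : PySem.Dict (Int × Int) Int) k =>
            d.insert k ((byNode.getD k.2 []).foldl (fun s p => if p.1 ≤ k.1 then s + p.2 else s) 0))
          PySem.Dict.empty).items)
  rw [hBitems, ← hkeysflat]
  simp only [List.map_map]
  apply List.map_congr_left
  intro k _
  simp [hV k]
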